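-- pv_equiv track=rewrite | github.com/lanl/qhat | qre/qre_hamiltonian.py | dense_to_sparse_pauli
-- ===== SOURCE A (Python) =====
-- def dense_to_sparse_pauli(dense_pauli):
--     sparse_pauli = tuple()
--     for idx, op in enumerate(dense_pauli):
--         if op in ["X", "Y", "Z"]:
--             sparse_pauli = (*sparse_pauli, (idx,op))
--         elif op != "I":
--             raise ValueError(f"Invalid character in dense pauli string: \"{op}\".")
--     return sparse_pauli
-- ===== SOURCE B (Python) =====
-- def dense_to_sparse_pauli(dense_pauli):
--     # pass 1: validate in order, so the first invalid char is reported as in A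
--     for op in dense_pauli:
--         if op not in ("X", "Y", "Z", "I"):
--             raise ValueError(f"Invalid character in dense pauli string: \"{op}\".")
--     # pass 2: build the sparse tuple in one comprehension (linear, no repeated tuple copying)
--     return tuple((idx, op) for idx, op in enumerate(dense_pauli) if op in ("X", "Y", "Z"))
-- ===== Notes on version B (the rewrite author's own statement) =====
-- stated objective: faster
-- what changed: Replace the single fused loop with O(n^2) tuple re-concatenation by two passes: an ordered validation scan, then a single generator comprehension building the result tuple once.
import Mathlib
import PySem

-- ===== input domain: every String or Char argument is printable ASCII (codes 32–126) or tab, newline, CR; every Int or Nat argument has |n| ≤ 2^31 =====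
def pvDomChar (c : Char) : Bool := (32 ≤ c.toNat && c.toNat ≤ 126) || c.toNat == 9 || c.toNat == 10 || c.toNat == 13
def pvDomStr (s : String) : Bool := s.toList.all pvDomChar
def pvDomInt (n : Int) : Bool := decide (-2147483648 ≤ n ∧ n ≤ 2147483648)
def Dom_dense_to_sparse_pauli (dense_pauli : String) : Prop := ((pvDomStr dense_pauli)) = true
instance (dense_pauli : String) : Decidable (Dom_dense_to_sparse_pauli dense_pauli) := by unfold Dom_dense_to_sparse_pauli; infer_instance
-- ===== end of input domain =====

-- B replaces A's fused loop with O(n^2) tuple re-concatenation by an ordered validation pass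
-- followed by a single comprehension building the result once (objective: faster, linear time).


-- ===== PORT A =====
-- the for-loop over enumerate(dense_pauli) with accumulator sparse_pauli;
-- the 'raise ValueError' branch stops and returns the accumulator (those inputs are outside Pre_)
def pvALoop : List (Int × Char) → List (Int × String) → List (Int × String)
  | [], acc => acc
  | (idx, op) :: rest, acc =>
    if op = 'X' ∨ op = 'Y' ∨ op = 'Z' then pvALoop rest (acc ++ [(idx, String.singleton op)])
    else if op ≠ 'I' then acc  -- raise ValueError (excluded by Pre_)
    else pvALoop rest acc

def dense_to_sparse_pauli (dense_pauli : String) : List (Int × String) :=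
  pvALoop (PySem.List.enumerate dense_pauli.toList 0) []

-- ===== PORT B =====
-- pass 1: scan in order for the first invalid char (the raise path; excluded by Pre_);
-- pass 2: one comprehension over enumerate
def dense_to_sparse_pauli_alt (dense_pauli : String) : List (Int × String) :=
  match dense_pauli.toList.find? (fun op => !(op = 'X' || op = 'Y' || op = 'Z' || op = 'I')) with
  | some _ => []  -- raise ValueError (excluded by Pre_)
  | none =>
    (PySem.List.enumerate dense_pauli.toList 0).filterMap
      (fun p => if p.2 = 'X' ∨ p.2 = 'Y' ∨ p.2 = 'Z' then some (p.1, String.singleton p.2) else none)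

-- ===== PRECONDITION & SPEC =====
-- Pre_ excludes exactly the strings containing a character other than X/Y/Z/I, on which A raises ValueError
def Pre_dense_to_sparse_pauli (dense_pauli : String) : Prop :=
  dense_pauli.toList.all (fun op => op = 'X' || op = 'Y' || op = 'Z' || op = 'I') = true
instance (dense_pauli : String) : Decidable (Pre_dense_to_sparse_pauli dense_pauli) := by unfold Pre_dense_to_sparse_pauli; infer_instance
def pvWitness_dense_to_sparse_pauli : String := "XIZYI"

def Spec_dense_to_sparse_pauli (dense_pauli : String) (out : List (Int × String)) : Prop := out = dense_to_sparse_pauli_alt dense_pauli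
instance (dense_pauli : String) (out : List (Int × String)) : Decidable (Spec_dense_to_sparse_pauli dense_pauli out) := by unfold Spec_dense_to_sparse_pauli; infer_instance

-- ===== CLAIM (what is proved, stated in full; the proofs are below) =====
def Claim_equal_dense_to_sparse_pauli : Prop := ∀ (dense_pauli : String), Dom_dense_to_sparse_pauli dense_pauli → Pre_dense_to_sparse_pauli dense_pauli → Spec_dense_to_sparse_pauli dense_pauli (dense_to_sparse_pauli dense_pauli)

-- ===== LEMMAS AND PROOFS =====

-- A's loop, on a list of valid characters, appends exactly B's comprehension output
theorem pvALoop_eq_filterMap (l : List (Int × Char)) (acc : List (Int × String))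
    (h : ∀ p ∈ l, p.2 = 'X' ∨ p.2 = 'Y' ∨ p.2 = 'Z' ∨ p.2 = 'I') :
    pvALoop l acc = acc ++ l.filterMap
      (fun p => if p.2 = 'X' ∨ p.2 = 'Y' ∨ p.2 = 'Z' then some (p.1, String.singleton p.2) else none) := by
  induction l generalizing acc with
  | nil => simp [pvALoop]
  | cons hd tl ih =>
    obtain ⟨idx, op⟩ := hd
    have hhd := h (idx, op) (List.mem_cons_self)
    have htl : ∀ p ∈ tl, p.2 = 'X' ∨ p.2 = 'Y' ∨ p.2 = 'Z' ∨ p.2 = 'I' :=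
      fun p hp => h p (List.mem_cons_of_mem _ hp)
    by_cases hx : op = 'X' ∨ op = 'Y' ∨ op = 'Z'
    · simp [pvALoop, hx, ih _ htl, List.filterMap_cons]
    · have hI : op = 'I' := by tauto
      simp [pvALoop, hx, hI, ih _ htl, List.filterMap_cons]

-- ===== VERDICT (by name: the statement is the Claim_ definition above) =====
theorem dense_to_sparse_pauli_spec : Claim_equal_dense_to_sparse_pauli := by
  intro s _ hpre
  unfold Spec_dense_to_sparse_pauli dense_to_sparse_pauli dense_to_sparse_pauli_alt
  unfold Pre_dense_to_sparse_pauli at hpre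
  rw [List.all_eq_true] at hpre
  have hfind : s.toList.find? (fun op => !(op = 'X' || op = 'Y' || op = 'Z' || op = 'I')) = none := by
    rw [List.find?_eq_none]
    intro c hc
    have := hpre c hc
    simp only [Bool.or_eq_true, decide_eq_true_eq] at this
    simp only [Bool.not_eq_true', Bool.or_eq_false_iff, decide_eq_false_iff_not]
    tauto
  rw [hfind]
  have hval : ∀ p ∈ PySem.List.enumerate s.toList 0,
      p.2 = 'X' ∨ p.2 = 'Y' ∨ p.2 = 'Z' ∨ p.2 = 'I' := by
    intro p hp
    rw [PySem.List.mem_enumerate_iff] at hp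
    obtain ⟨k, hk, rfl⟩ := hp
    have := hpre (s.toList[k]) (List.getElem_mem hk)
    simp only [Bool.or_eq_true, decide_eq_true_eq] at this
    tauto
  rw [pvALoop_eq_filterMap _ _ hval]
  simp
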